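-- pv_equiv track=rewrite | github.com/tracy-talent/AIPolicy | test/corpus_infer.py | filter_entity_overlap
-- ===== SOURCE A (Python) =====
-- def filter_entity_overlap(entities: list) -> list:
--     filter_entities = []
--     for ent1 in entities:
--         flag = True
--         for ent2 in entities:
--             if ent1 == ent2:
--                 continue
--             if ent1[0][0] >= ent2[0][0] and ent1[0][1] <= ent2[0][1]:
--                 flag = False
--                 break
--         if flag:
--             filter_entities.append(ent1)
--     return filter_entities
-- ===== SOURCE B (Python) =====
-- def filter_entity_overlap(entities: list) -> list:
--     # one pass: per span, first entity seen + whether a different-valued entity shares the span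
--     spans = {}
--     for ent in entities:
--         key = (ent[0][0], ent[0][1])
--         if key in spans:
--             first, multi = spans[key]
--             if not multi and ent != first:
--                 spans[key] = (first, True)
--         else:
--             spans[key] = (ent, False)
--     # sort distinct spans by (left asc, right desc); a running max of right endpoints
--     # marks exactly the spans strictly contained in some other span
--     contained = {}
--     runmax = None
--     for (l, r) in sorted(spans, key=lambda p: (p[0], -p[1])):
--         contained[(l, r)] = runmax is not None and runmax >= r
--         if runmax is None or r > runmax:
--             runmax = r
--     return [ent for ent in entities
--             if not contained[(ent[0][0], ent[0][1])]
--             and not spans[(ent[0][0], ent[0][1])][1]]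
-- ===== Notes on version B (the rewrite author's own statement) =====
-- stated objective: faster
-- what changed: A's O(n^2) all-pairs containment scan is replaced by one dict pass grouping entities by span (recording the first entity and a different-value flag) plus a sort of the distinct spans by (left asc, right desc) with a running maximum of right endpoints that marks strictly contained spans.
-- outside the precondition, e.g. on filter_entity_overlap([[]]): A returns [[]], B raises IndexError; on filter_entity_overlap([[[5]]]): A returns [[[5]]], B raises IndexError
import Mathlib
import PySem

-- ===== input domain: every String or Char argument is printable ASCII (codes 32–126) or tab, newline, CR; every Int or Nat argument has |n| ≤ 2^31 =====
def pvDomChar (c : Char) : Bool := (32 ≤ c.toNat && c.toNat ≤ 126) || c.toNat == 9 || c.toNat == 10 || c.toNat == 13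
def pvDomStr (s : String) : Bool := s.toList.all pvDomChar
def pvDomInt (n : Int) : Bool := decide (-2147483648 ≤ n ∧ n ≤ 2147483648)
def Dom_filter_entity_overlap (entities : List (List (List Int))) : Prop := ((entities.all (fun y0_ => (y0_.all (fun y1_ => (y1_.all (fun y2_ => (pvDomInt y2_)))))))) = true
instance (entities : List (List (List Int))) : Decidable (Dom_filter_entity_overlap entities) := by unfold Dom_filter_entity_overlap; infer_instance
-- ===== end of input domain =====

-- B replaces A's O(n^2) all-pairs containment scan by one grouping pass over a span dict plus a
-- sort of the distinct spans with a running maximum of right endpoints.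


-- ent[0][j] of both Pythons; exact whenever ent ≠ [] and ent[0] has ≥ 2 elements (guaranteed by Pre_)
def pvAt (ent : List (List Int)) (j : Int) : Int :=
  PySem.List.pyGetD (PySem.List.pyGetD ent 0 []) j 0

-- the span (ent[0][0], ent[0][1]) of an entity
def pvKey (ent : List (List Int)) : Int × Int := (pvAt ent 0, pvAt ent 1)

-- ===== PORT A =====
-- inner 'for ent2 in …' loop of A: True survives, break returns False
def pvInnerA (ent1 : List (List Int)) : List (List (List Int)) → Bool
  | [] => true
  | ent2 :: rest =>
    if ent1 = ent2 then pvInnerA ent1 rest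
    else if pvAt ent2 0 ≤ pvAt ent1 0 ∧ pvAt ent1 1 ≤ pvAt ent2 1 then false
    else pvInnerA ent1 rest

def filter_entity_overlap (entities : List (List (List Int))) : List (List (List Int)) :=
  entities.foldl (fun acc ent1 => if pvInnerA ent1 entities then acc ++ [ent1] else acc) []

-- ===== PORT B =====
-- one step of B's first loop: spans[key] = (first entity seen with this span, seen-a-different-value flag)
def pvSpansStep (d : PySem.Dict (Int × Int) (List (List Int) × Bool)) (ent : List (List Int)) :
    PySem.Dict (Int × Int) (List (List Int) × Bool) :=
  match d.get? (pvKey ent) with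
  | some fm => if fm.2 = false ∧ ent ≠ fm.1 then d.insert (pvKey ent) (fm.1, true) else d
  | none => d.insert (pvKey ent) (ent, false)

-- one step of B's second loop over the sorted distinct spans: record containment, bump the running max
def pvContStep (st : PySem.Dict (Int × Int) Bool × Option Int) (k : Int × Int) :
    PySem.Dict (Int × Int) Bool × Option Int :=
  (st.1.insert k (match st.2 with | none => false | some m => decide (k.2 ≤ m)),
   match st.2 with | none => some k.2 | some m => if m < k.2 then some k.2 else some m)

def filter_entity_overlap_alt (entities : List (List (List Int))) : List (List (List Int)) :=
  let spans := entities.foldl pvSpansStep PySem.Dict.empty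
  let st := (PySem.List.sorted2 spans.keys (fun p => p.1) (fun p => -p.2)).foldl
      pvContStep (PySem.Dict.empty, none)
  entities.filter (fun ent =>
    !(st.1.getD (pvKey ent) false) && !((spans.getD (pvKey ent) ([], false)).2))

-- ===== PRECONDITION & SPEC =====
-- Pre_ excludes malformed entities (ent missing ent[0][0] / ent[0][1]): there Python A raises
-- IndexError — except on a few degenerate lists (e.g. all entities pairwise equal, or only the
-- short-circuited left comparison reached) where A still returns; B raises on those, so they stay outside Pre_.
def Pre_filter_entity_overlap (entities : List (List (List Int))) : Prop :=
  ∀ e ∈ entities, e ≠ [] ∧ 2 ≤ (e.headD []).length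
instance (entities : List (List (List Int))) : Decidable (Pre_filter_entity_overlap entities) := by
  unfold Pre_filter_entity_overlap; infer_instance

def pvWitness_filter_entity_overlap : List (List (List Int)) := [[[0, 2]], [[1, 2]]]

def Spec_filter_entity_overlap (entities : List (List (List Int))) (out : List (List (List Int))) : Prop := out = filter_entity_overlap_alt entities
instance (entities : List (List (List Int))) (out : List (List (List Int))) : Decidable (Spec_filter_entity_overlap entities out) := by unfold Spec_filter_entity_overlap; infer_instance

-- ===== CLAIM (what is proved, stated in full; the proofs are below) =====
def Claim_equal_filter_entity_overlap : Prop := ∀ (entities : List (List (List Int))), Dom_filter_entity_overlap entities → Pre_filter_entity_overlap entities → Spec_filter_entity_overlap entities (filter_entity_overlap entities)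

-- ===== LEMMAS AND PROOFS =====

-- strict lexicographic order (left asc, right desc) used by B's sort
def pvLexLt (p q : Int × Int) : Prop := p.1 < q.1 ∨ (p.1 = q.1 ∧ q.2 < p.2)

theorem pvLexLt_trans {p q r : Int × Int} (h1 : pvLexLt p q) (h2 : pvLexLt q r) : pvLexLt p r := by
  unfold pvLexLt at *; omega

theorem pvLexLt_irrefl (p : Int × Int) : ¬ pvLexLt p p := by unfold pvLexLt; omega

theorem pvLexLt_asymm {p q : Int × Int} (h : pvLexLt p q) : ¬ pvLexLt q p := by
  unfold pvLexLt at *; omega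

theorem pvLexLt_total {p q : Int × Int} (h : p ≠ q) : pvLexLt p q ∨ pvLexLt q p := by
  rcases p with ⟨a, b⟩; rcases q with ⟨c, d⟩
  have h' : a ≠ c ∨ b ≠ d := by
    rcases eq_or_ne a c with rfl | hac
    · exact Or.inr (fun hbd => h (by simp [hbd]))
    · exact Or.inl hac
  unfold pvLexLt
  dsimp only
  omega

-- the Bool comparator sorted2 uses on B's keys
def pvBefore (p q : Int × Int) : Bool :=
  decide (p.1 < q.1) || (!decide (q.1 < p.1) && decide (-p.2 < -q.2))

theorem pvBefore_iff (p q : Int × Int) : pvBefore p q = true ↔ pvLexLt p q := by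
  unfold pvBefore pvLexLt
  simp only [Bool.or_eq_true, Bool.and_eq_true, Bool.not_eq_true', decide_eq_true_eq,
    decide_eq_false_iff_not]
  omega

theorem insertBy_pairwise (x : Int × Int) (ys : List (Int × Int))
    (hp : ys.Pairwise pvLexLt) (hx : x ∉ ys) :
    (PySem.List.insertBy pvBefore x ys).Pairwise pvLexLt := by
  induction ys with
  | nil => simp [PySem.List.insertBy]
  | cons y ys ih =>
    rcases List.pairwise_cons.mp hp with ⟨hy, hys⟩
    simp only [PySem.List.insertBy]
    split
    · rename_i hb
      have hxy := (pvBefore_iff x y).mp hb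
      refine List.pairwise_cons.mpr ⟨?_, hp⟩
      intro z hz
      rcases List.mem_cons.mp hz with rfl | hz
      · exact hxy
      · exact pvLexLt_trans hxy (hy z hz)
    · rename_i hb
      have hne : x ≠ y := by rintro rfl; exact hx List.mem_cons_self
      have hyx : pvLexLt y x := by
        rcases pvLexLt_total hne with h | h
        · exact absurd ((pvBefore_iff x y).mpr h) (by simpa using hb)
        · exact h
      refine List.pairwise_cons.mpr ⟨?_, ih hys (fun h => hx (List.mem_cons_of_mem _ h))⟩
      intro z hz
      rcases (PySem.List.mem_insertBy _ _ _ _).mp hz with rfl | hz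
      · exact hyx
      · exact hy z hz

theorem sorted2_foldl_pairwise (t : List (Int × Int)) (acc : List (Int × Int))
    (hacc : acc.Pairwise pvLexLt) (hdisj : ∀ x ∈ t, x ∉ acc) (hnd : t.Nodup) :
    (t.foldl (fun acc x => PySem.List.insertBy pvBefore x acc) acc).Pairwise pvLexLt := by
  induction t generalizing acc with
  | nil => simpa using hacc
  | cons h t ih =>
    rcases List.nodup_cons.mp hnd with ⟨hht, hnd'⟩
    simp only [List.foldl_cons]
    refine ih _ (insertBy_pairwise h acc hacc (hdisj h List.mem_cons_self)) ?_ hnd'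
    intro x hx hmem
    rcases (PySem.List.mem_insertBy _ _ _ _).mp hmem with rfl | hmem
    · exact hht hx
    · exact hdisj x (List.mem_cons_of_mem _ hx) hmem

theorem sorted2_pairwise_of_nodup (ks : List (Int × Int)) (hnd : ks.Nodup) :
    (PySem.List.sorted2 ks (fun p => p.1) (fun p => -p.2)).Pairwise pvLexLt := by
  have heq : PySem.List.sorted2 ks (fun p : Int × Int => p.1) (fun p => -p.2) =
      ks.foldl (fun acc x => PySem.List.insertBy pvBefore x acc) [] := by
    simp only [PySem.List.sorted2]
    rfl
  rw [heq]
  exact sorted2_foldl_pairwise ks [] (by simp) (by simp) hnd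

-- running-max test: 'runmax is not None and runmax >= r'
def pvRmLE (rm : Option Int) (x : Int) : Bool :=
  match rm with | none => false | some m => decide (x ≤ m)

-- the updated running max
def pvBump (rm : Option Int) (r : Int) : Option Int :=
  match rm with | none => some r | some m => if m < r then some r else some m

theorem pvContStep_eq (st : PySem.Dict (Int × Int) Bool × Option Int) (k : Int × Int) :
    pvContStep st k = (st.1.insert k (pvRmLE st.2 k.2), pvBump st.2 k.2) := by
  cases st with
  | mk c rm => cases rm <;> rfl

theorem contFold (t : List (Int × Int)) (P : List (Int × Int))
    (cont : PySem.Dict (Int × Int) Bool) (rm : Option Int)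
    (hpair : (P ++ t).Pairwise pvLexLt)
    (hrm : ∀ x : Int, pvRmLE rm x = true ↔ ∃ p ∈ P, x ≤ p.2) :
    (∀ k, k ∉ t → (t.foldl pvContStep (cont, rm)).1.getD k false = cont.getD k false) ∧
    (∀ k ∈ t, ((t.foldl pvContStep (cont, rm)).1.getD k false = true ↔
      ∃ p ∈ P ++ t, pvLexLt p k ∧ k.2 ≤ p.2)) := by
  induction t generalizing P cont rm with
  | nil => exact ⟨fun k _ => rfl, by simp⟩
  | cons k0 t ih =>
    have hpairP : ∀ p ∈ P, ∀ q ∈ k0 :: t, pvLexLt p q := (List.pairwise_append.mp hpair).2.2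
    have hpairT : (k0 :: t).Pairwise pvLexLt := (List.pairwise_append.mp hpair).2.1
    have hk0t : ∀ q ∈ t, pvLexLt k0 q := (List.pairwise_cons.mp hpairT).1
    have hk0nt : k0 ∉ t := fun h => pvLexLt_irrefl k0 (hk0t k0 h)
    have hpair' : ((P ++ [k0]) ++ t).Pairwise pvLexLt := by
      rw [List.append_assoc]
      simpa using hpair
    have hstep : (k0 :: t).foldl pvContStep (cont, rm) =
        t.foldl pvContStep (cont.insert k0 (pvRmLE rm k0.2), pvBump rm k0.2) := by
      rw [List.foldl_cons, pvContStep_eq]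
    have hrm' : ∀ x : Int, pvRmLE (pvBump rm k0.2) x = true ↔ ∃ p ∈ P ++ [k0], x ≤ p.2 := by
      intro x
      cases rm with
      | none =>
        simp only [pvBump, pvRmLE, decide_eq_true_eq, List.mem_append, List.mem_singleton]
        constructor
        · intro h; exact ⟨k0, Or.inr rfl, h⟩
        · rintro ⟨p, hp | rfl, hx⟩
          · exact absurd ((hrm x).mpr ⟨p, hp, hx⟩) (by simp [pvRmLE])
          · exact hx
      | some m =>
        have hm := hrm x
        simp only [pvRmLE, decide_eq_true_eq] at hm
        by_cases hlt : m < k0.2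
        · simp only [pvBump, if_pos hlt, pvRmLE, decide_eq_true_eq, List.mem_append,
            List.mem_singleton]
          constructor
          · intro h
            by_cases hxm : x ≤ m
            · rcases hm.mp hxm with ⟨p, hp, hxp⟩; exact ⟨p, Or.inl hp, hxp⟩
            · exact ⟨k0, Or.inr rfl, h⟩
          · rintro ⟨p, hp | rfl, hx⟩
            · have := hm.mpr ⟨p, hp, hx⟩; omega
            · exact hx
        · simp only [pvBump, if_neg hlt, pvRmLE, decide_eq_true_eq, List.mem_append,
            List.mem_singleton]
          constructor
          · intro h
            rcases hm.mp h with ⟨p, hp, hxp⟩; exact ⟨p, Or.inl hp, hxp⟩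
          · rintro ⟨p, hp | rfl, hx⟩
            · exact hm.mpr ⟨p, hp, hx⟩
            · omega
    rcases ih (P ++ [k0]) (cont.insert k0 (pvRmLE rm k0.2)) (pvBump rm k0.2) hpair' hrm' with
      ⟨pres, chr⟩
    constructor
    · intro k hk
      have hknt : k ∉ t := fun h => hk (List.mem_cons_of_mem _ h)
      have hkne : k ≠ k0 := fun h => hk (h ▸ List.mem_cons_self)
      rw [hstep, pres k hknt, PySem.Dict.getD_insert_of_ne _ _ _ hkne]
    · intro k hk
      rcases List.mem_cons.mp hk with rfl | hkt
      · rw [hstep, pres k hk0nt, PySem.Dict.getD_insert_self]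
        rw [hrm k.2]
        constructor
        · rintro ⟨p, hp, hx⟩
          exact ⟨p, List.mem_append.mpr (Or.inl hp), hpairP p hp k List.mem_cons_self, hx⟩
        · rintro ⟨p, hp, hlt, hx⟩
          rcases List.mem_append.mp hp with hp | hp
          · exact ⟨p, hp, hx⟩
          · rcases List.mem_cons.mp hp with rfl | hp
            · exact absurd hlt (pvLexLt_irrefl p)
            · exact absurd hlt (pvLexLt_asymm (hk0t p hp))
      · rw [hstep, chr k hkt]
        constructor
        · rintro ⟨p, hp, h⟩
          refine ⟨p, ?_, h⟩
          rcases List.mem_append.mp hp with hp | hp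
          · rcases List.mem_append.mp hp with hp | hp
            · exact List.mem_append.mpr (Or.inl hp)
            · exact List.mem_append.mpr (Or.inr (List.mem_singleton.mp hp ▸ List.mem_cons_self))
          · exact List.mem_append.mpr (Or.inr (List.mem_cons_of_mem _ hp))
        · rintro ⟨p, hp, h⟩
          refine ⟨p, ?_, h⟩
          rcases List.mem_append.mp hp with hp | hp
          · exact List.mem_append.mpr (Or.inl (List.mem_append.mpr (Or.inl hp)))
          · rcases List.mem_cons.mp hp with rfl | hp
            · exact List.mem_append.mpr (Or.inl (List.mem_append.mpr (Or.inr (List.mem_singleton_self _))))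
            · exact List.mem_append.mpr (Or.inr hp)

-- first-seen entity and multi flag of a span group
def pvInfoOpt : List (List (List Int)) → Option (List (List Int) × Bool)
  | [] => none
  | e :: rest => some (e, decide (∃ v ∈ rest, v ≠ e))

theorem spansStep_get? (d : PySem.Dict (Int × Int) (List (List Int) × Bool))
    (e : List (List Int)) (P : List (List (List Int)))
    (hd : ∀ k, d.get? k = pvInfoOpt (P.filter (fun x => pvKey x = k))) :
    ∀ k, (pvSpansStep d e).get? k = pvInfoOpt ((P ++ [e]).filter (fun x => pvKey x = k)) := by
  intro k
  by_cases hk : pvKey e = k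
  · subst hk
    have hfil : (P ++ [e]).filter (fun x => pvKey x = pvKey e) =
        P.filter (fun x => pvKey x = pvKey e) ++ [e] := by
      simp [List.filter_append]
    rw [hfil]
    have hdk := hd (pvKey e)
    rcases hg : P.filter (fun x => pvKey x = pvKey e) with _ | ⟨f, rest⟩
    · rw [hg] at hdk
      simp only [pvInfoOpt] at hdk
      simp only [pvSpansStep, hdk]
      rw [PySem.Dict.get?_insert_self]
      simp [pvInfoOpt]
    · rw [hg] at hdk
      simp only [pvInfoOpt] at hdk
      simp only [pvSpansStep, hdk]
      by_cases hmulti : ∃ v ∈ rest, v ≠ f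
      · rw [if_neg (by simp [hmulti])]
        rw [hdk]
        have h2 : ∃ v, (v ∈ rest ∨ v = e) ∧ ¬ v = f := by
          rcases hmulti with ⟨v, hv, hne⟩; exact ⟨v, Or.inl hv, hne⟩
        simp [pvInfoOpt, hmulti, h2]
      · by_cases hef : e = f
        · rw [if_neg (by simp [hef])]
          rw [hdk]
          have h2 : ¬ ∃ v, (v ∈ rest ∨ v = e) ∧ ¬ v = f := by
            rintro ⟨v, hv | hv, hne⟩
            · exact hmulti ⟨v, hv, hne⟩
            · exact hne (hv ▸ hef)
          simp [pvInfoOpt, hmulti, h2]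
        · rw [if_pos (by simp [hmulti, hef])]
          rw [PySem.Dict.get?_insert_self]
          have h2 : ∃ v, (v ∈ rest ∨ v = e) ∧ ¬ v = f := ⟨e, Or.inr rfl, hef⟩
          simp [pvInfoOpt, h2]
  · have hfil : (P ++ [e]).filter (fun x => pvKey x = k) = P.filter (fun x => pvKey x = k) := by
      simp [List.filter_append, hk]
    rw [hfil, ← hd k]
    rcases hdk : d.get? (pvKey e) with _ | fm
    · simp only [pvSpansStep, hdk]
      exact PySem.Dict.get?_insert_of_ne _ _ (fun h => hk h.symm)
    · simp only [pvSpansStep, hdk]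
      split
      · exact PySem.Dict.get?_insert_of_ne _ _ (fun h => hk h.symm)
      · rfl

theorem spansFold (l : List (List (List Int))) (P : List (List (List Int)))
    (d : PySem.Dict (Int × Int) (List (List Int) × Bool))
    (hd : ∀ k, d.get? k = pvInfoOpt (P.filter (fun x => pvKey x = k))) :
    ∀ k, (l.foldl pvSpansStep d).get? k = pvInfoOpt ((P ++ l).filter (fun x => pvKey x = k)) := by
  induction l generalizing P d with
  | nil => simpa using hd
  | cons e l ih =>
    intro k
    rw [List.foldl_cons]
    rw [ih (P ++ [e]) (pvSpansStep d e) (spansStep_get? d e P hd) k]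
    rw [List.append_assoc]
    rfl

theorem spans_nodup_keys (l : List (List (List Int))) (d : PySem.Dict (Int × Int) (List (List Int) × Bool))
    (h : d.keys.Nodup) : (l.foldl pvSpansStep d).keys.Nodup := by
  induction l generalizing d with
  | nil => simpa
  | cons e l ih =>
    refine ih _ ?_
    unfold pvSpansStep
    split
    · split
      · exact PySem.Dict.nodup_keys_insert _ _ _ h
      · exact h
    · exact PySem.Dict.nodup_keys_insert _ _ _ h

theorem pvInnerA_iff (e : List (List Int)) (l : List (List (List Int))) :
    pvInnerA e l = true ↔ ¬ ∃ v ∈ l, v ≠ e ∧ pvAt v 0 ≤ pvAt e 0 ∧ pvAt e 1 ≤ pvAt v 1 := by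
  induction l with
  | nil => simp [pvInnerA]
  | cons v l ih =>
    simp only [pvInnerA]
    split
    · rename_i hev
      rw [ih]
      constructor
      · intro h hex
        rcases hex with ⟨w, hw, hne, hc⟩
        rcases List.mem_cons.mp hw with rfl | hw
        · exact hne hev.symm
        · exact h ⟨w, hw, hne, hc⟩
      · intro h hex
        rcases hex with ⟨w, hw, hne, hc⟩
        exact h ⟨w, List.mem_cons_of_mem _ hw, hne, hc⟩
    · rename_i hev
      split
      · rename_i hcond
        simp only [Bool.false_eq_true, false_iff, not_not]
        exact ⟨v, List.mem_cons_self, fun h => hev h.symm, hcond.1, hcond.2⟩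
      · rename_i hcond
        rw [ih]
        constructor
        · intro h hex
          rcases hex with ⟨w, hw, hne, hc⟩
          rcases List.mem_cons.mp hw with rfl | hw
          · exact hcond ⟨hc.1, hc.2⟩
          · exact h ⟨w, hw, hne, hc⟩
        · intro h hex
          rcases hex with ⟨w, hw, hne, hc⟩
          exact h ⟨w, List.mem_cons_of_mem _ hw, hne, hc⟩

theorem lex_cont_iff (p k : Int × Int) :
    (pvLexLt p k ∧ k.2 ≤ p.2) ↔ (p ≠ k ∧ p.1 ≤ k.1 ∧ k.2 ≤ p.2) := by
  rcases p with ⟨a, b⟩; rcases k with ⟨c, d⟩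
  simp only [pvLexLt, ne_eq, Prod.mk.injEq, not_and]
  constructor
  · rintro ⟨h1 | h1, h2⟩
    · exact ⟨fun h => by omega, by omega, h2⟩
    · exact ⟨fun h hh => by omega, by omega, h2⟩
  · rintro ⟨h1, h2, h3⟩
    by_cases hac : a = c
    · subst hac
      have : ¬ b = d := h1 rfl
      exact ⟨Or.inr ⟨rfl, by omega⟩, h3⟩
    · exact ⟨Or.inl (by omega), h3⟩

theorem main_equiv (entities : List (List (List Int))) :
    filter_entity_overlap entities = filter_entity_overlap_alt entities := by
  have hspans : ∀ k, (entities.foldl pvSpansStep PySem.Dict.empty).get? k =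
      pvInfoOpt (entities.filter (fun x => pvKey x = k)) := by
    have h0 : ∀ k : Int × Int, (PySem.Dict.empty : PySem.Dict (Int × Int) (List (List Int) × Bool)).get? k =
        pvInfoOpt (([] : List (List (List Int))).filter (fun x => pvKey x = k)) := by
      intro k; simp [pvInfoOpt, PySem.Dict.get?_empty]
    have := spansFold entities [] PySem.Dict.empty h0
    simpa using this
  have hnd : (entities.foldl pvSpansStep PySem.Dict.empty).keys.Nodup :=
    spans_nodup_keys entities _ (by simp [PySem.Dict.keys_empty])
  have hperm : (PySem.List.sorted2 (entities.foldl pvSpansStep PySem.Dict.empty).keys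
      (fun p => p.1) (fun p => -p.2)).Perm (entities.foldl pvSpansStep PySem.Dict.empty).keys :=
    PySem.List.sorted2_perm _ _ _ _
  have hpair : (PySem.List.sorted2 (entities.foldl pvSpansStep PySem.Dict.empty).keys
      (fun p => p.1) (fun p => -p.2)).Pairwise pvLexLt :=
    sorted2_pairwise_of_nodup _ hnd
  have hmem : ∀ k, k ∈ (entities.foldl pvSpansStep PySem.Dict.empty).keys ↔
      ∃ x ∈ entities, pvKey x = k := by
    intro k
    constructor
    · intro hk
      rcases hg : entities.filter (fun x => pvKey x = k) with _ | ⟨f, rest⟩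
      · exfalso
        have := hspans k
        rw [hg] at this
        exact ((PySem.Dict.get?_eq_none_iff_not_mem_keys _ _).mp (by simpa [pvInfoOpt] using this)) hk
      · have hf : f ∈ entities.filter (fun x => pvKey x = k) := hg ▸ List.mem_cons_self
        rcases List.mem_filter.mp hf with ⟨hfe, hfk⟩
        exact ⟨f, hfe, by simpa using hfk⟩
    · rintro ⟨x, hx, rfl⟩
      by_contra hk
      have := hspans (pvKey x)
      rw [(PySem.Dict.get?_eq_none_iff_not_mem_keys _ _).mpr hk] at this
      have hxf : x ∈ entities.filter (fun y => pvKey y = pvKey x) :=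
        List.mem_filter.mpr ⟨hx, by simp⟩
      rcases hg : entities.filter (fun y => pvKey y = pvKey x) with _ | ⟨f, rest⟩
      · rw [hg] at hxf; exact absurd hxf (List.not_mem_nil)
      · rw [hg] at this; simp [pvInfoOpt] at this
  have hcont := contFold (PySem.List.sorted2 (entities.foldl pvSpansStep PySem.Dict.empty).keys
      (fun p => p.1) (fun p => -p.2)) [] PySem.Dict.empty none (by simpa using hpair)
      (by intro x; simp [pvRmLE])
  unfold filter_entity_overlap filter_entity_overlap_alt
  dsimp only
  rw [show (fun (acc : List (List (List Int))) (ent1 : List (List Int)) =>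
        if pvInnerA ent1 entities = true then acc ++ [ent1] else acc)
      = (fun acc x => if pvInnerA x entities = true then acc ++ [id x] else acc) from rfl]
  rw [PySem.List.foldl_append_if (fun x => pvInnerA x entities) id entities []]
  simp only [List.map_id, List.nil_append]
  apply List.filter_congr
  intro e he
  obtain ⟨f, rest, hg⟩ : ∃ f rest, entities.filter (fun x => pvKey x = pvKey e) = f :: rest := by
    rcases hgg : entities.filter (fun x => pvKey x = pvKey e) with _ | ⟨f, rest⟩
    · exfalso
      have hxf : e ∈ entities.filter (fun y => pvKey y = pvKey e) :=
        List.mem_filter.mpr ⟨he, by simp⟩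
      rw [hgg] at hxf
      exact absurd hxf (List.not_mem_nil)
    · exact ⟨f, rest, rfl⟩
  have hfprop : f ∈ entities ∧ pvKey f = pvKey e := by
    have hf : f ∈ entities.filter (fun x => pvKey x = pvKey e) := hg ▸ List.mem_cons_self
    rcases List.mem_filter.mp hf with ⟨hfe, hfk⟩
    exact ⟨hfe, by simpa using hfk⟩
  have hemem : e ∈ f :: rest := hg ▸ List.mem_filter.mpr ⟨he, by simp⟩
  have hrest : ∀ v ∈ rest, v ∈ entities ∧ pvKey v = pvKey e := by
    intro v hv
    have : v ∈ entities.filter (fun x => pvKey x = pvKey e) := hg ▸ List.mem_cons_of_mem _ hv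
    rcases List.mem_filter.mp this with ⟨h1, h2⟩
    exact ⟨h1, by simpa using h2⟩
  have hgetD : (entities.foldl pvSpansStep PySem.Dict.empty).getD (pvKey e) ([], false) =
      (f, decide (∃ v ∈ rest, v ≠ f)) := by
    rw [PySem.Dict.getD_eq_get?_getD, hspans (pvKey e), hg]
    rfl
  have hmulti : (∃ v ∈ rest, v ≠ f) ↔ ∃ v ∈ entities, pvKey v = pvKey e ∧ v ≠ e := by
    constructor
    · rintro ⟨v, hv, hne⟩
      rcases hrest v hv with ⟨hve, hvk⟩
      by_cases hveq : v = e
      · subst hveq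
        exact ⟨f, hfprop.1, hfprop.2, fun h => hne h.symm⟩
      · exact ⟨v, hve, hvk, hveq⟩
    · rintro ⟨v, hv, hvk, hne⟩
      have hvf : v ∈ f :: rest := hg ▸ List.mem_filter.mpr ⟨hv, by simp [hvk]⟩
      rcases List.mem_cons.mp hvf with rfl | hvr
      · rcases List.mem_cons.mp hemem with rfl | her
        · exact absurd rfl hne
        · exact ⟨e, her, fun h => hne h.symm⟩
      · by_cases hvfeq : v = f
        · subst hvfeq
          rcases List.mem_cons.mp hemem with rfl | her
          · exact absurd rfl hne
          · exact ⟨e, her, fun h => hne h.symm⟩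
        · exact ⟨v, hvr, hvfeq⟩
  have hkmem : pvKey e ∈ (entities.foldl pvSpansStep PySem.Dict.empty).keys :=
    (hmem _).mpr ⟨e, he, rfl⟩
  have hkmems : pvKey e ∈ PySem.List.sorted2 (entities.foldl pvSpansStep PySem.Dict.empty).keys
      (fun p => p.1) (fun p => -p.2) := hperm.mem_iff.mpr hkmem
  have hcontk := hcont.2 (pvKey e) hkmems
  simp only [List.nil_append] at hcontk
  have hcontk' : ((PySem.List.sorted2 (entities.foldl pvSpansStep PySem.Dict.empty).keys
        (fun p => p.1) (fun p => -p.2)).foldl pvContStep (PySem.Dict.empty, none)).1.getD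
        (pvKey e) false = true ↔
      ∃ v ∈ entities, pvKey v ≠ pvKey e ∧ pvAt v 0 ≤ pvAt e 0 ∧ pvAt e 1 ≤ pvAt v 1 := by
    rw [hcontk]
    constructor
    · rintro ⟨p, hp, hcond⟩
      rcases (lex_cont_iff p (pvKey e)).mp hcond with ⟨hne, h1, h2⟩
      rcases (hmem p).mp (hperm.mem_iff.mp hp) with ⟨v, hv, rfl⟩
      exact ⟨v, hv, hne, h1, h2⟩
    · rintro ⟨v, hv, hne, h1, h2⟩
      refine ⟨pvKey v, hperm.mem_iff.mpr ((hmem _).mpr ⟨v, hv, rfl⟩),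
        (lex_cont_iff (pvKey v) (pvKey e)).mpr ⟨hne, h1, h2⟩⟩
  rw [Bool.eq_iff_iff]
  rw [pvInnerA_iff]
  simp only [Bool.and_eq_true, Bool.not_eq_true']
  rw [hgetD]
  constructor
  · intro hnone
    constructor
    · rw [Bool.eq_false_iff]
      intro hc
      rcases hcontk'.mp hc with ⟨v, hv, hne, h1, h2⟩
      exact hnone ⟨v, hv, fun h => hne (h ▸ rfl), h1, h2⟩
    · simp only [decide_eq_false_iff_not]
      intro hm
      rcases hmulti.mp hm with ⟨v, hv, hvk, hne⟩
      have h1 : pvAt v 0 = pvAt e 0 := congrArg Prod.fst hvk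
      have h2 : pvAt v 1 = pvAt e 1 := congrArg Prod.snd hvk
      exact hnone ⟨v, hv, hne, by omega, by omega⟩
  · rintro ⟨hc, hm⟩ ⟨v, hv, hne, h1, h2⟩
    by_cases hvk : pvKey v = pvKey e
    · have hd : decide (∃ v ∈ rest, v ≠ f) = true :=
        decide_eq_true (hmulti.mpr ⟨v, hv, hvk, hne⟩)
      have hm' : decide (∃ v ∈ rest, v ≠ f) = false := hm
      rw [hm'] at hd
      exact Bool.false_ne_true hd
    · have : ((PySem.List.sorted2 (entities.foldl pvSpansStep PySem.Dict.empty).keys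
          (fun p => p.1) (fun p => -p.2)).foldl pvContStep (PySem.Dict.empty, none)).1.getD
          (pvKey e) false = true := hcontk'.mpr ⟨v, hv, hvk, h1, h2⟩
      rw [hc] at this
      simp at this

-- ===== VERDICT (by name: the statement is the Claim_ definition above) =====
theorem filter_entity_overlap_spec : Claim_equal_filter_entity_overlap := by
  intro entities _ _
  unfold Spec_filter_entity_overlap
  exact main_equiv entities
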